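-- pv_equiv track=rewrite | github.com/tobysh/colly-code | december/8.12.25/2d_matrix.py | sum_outer_border
-- ===== SOURCE A (Python) =====
-- def sum_outer_border(matrix):
--     if not matrix or not matrix[0]:
--         return 0
--
--     total = 0
--     rows = len(matrix)
--     cols = len(matrix[0])
--
--     total += sum(matrix[0])
--
--     if rows > 1:
--         total += sum(matrix[rows - 1])
--
--     for i in range(1, rows - 1):
--         total += matrix[i][0]
--         if cols > 1:
--             total += matrix[i][cols - 1]
--     return total
-- ===== SOURCE B (Python) =====
-- def sum_outer_border(matrix):
--     if not matrix or not matrix[0]: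
--         return 0
--     cols = len(matrix[0])
--
--     def rest_sum(rows):
--         if not rows:
--             return 0
--         if len(rows) == 1:
--             return sum(rows[0])
--         return rows[0][0] + (rows[0][cols - 1] if cols > 1 else 0) + rest_sum(rows[1:])
--
--     return sum(matrix[0]) + rest_sum(matrix[1:])
-- ===== Notes on version B (the rewrite author's own statement) =====
-- stated objective: alternative
-- what changed: Replaces A's index-arithmetic scheme (sum row 0, sum row rows-1, then a range(1,rows-1) loop indexing matrix[i]) by a structural recursion over the tail of the matrix: the last remaining row contributes its full sum, every earlier row contributes its two edge elements; no row or length indexing of the outer list at all.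
import Mathlib
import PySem

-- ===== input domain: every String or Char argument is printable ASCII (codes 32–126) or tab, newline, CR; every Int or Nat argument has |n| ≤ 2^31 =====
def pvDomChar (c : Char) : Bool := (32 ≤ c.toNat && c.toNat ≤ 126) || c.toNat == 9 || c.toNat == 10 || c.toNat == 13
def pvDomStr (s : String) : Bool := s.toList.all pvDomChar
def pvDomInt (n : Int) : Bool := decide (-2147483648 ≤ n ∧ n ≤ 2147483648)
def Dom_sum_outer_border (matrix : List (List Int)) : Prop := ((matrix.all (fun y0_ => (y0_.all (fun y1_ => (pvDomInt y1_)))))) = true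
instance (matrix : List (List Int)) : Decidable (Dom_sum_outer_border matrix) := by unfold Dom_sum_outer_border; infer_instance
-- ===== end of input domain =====

-- B replaces A's index arithmetic (row 0 + row rows-1 + range(1,rows-1) loop) by a structural
-- recursion over the matrix tail (last row full sum, earlier rows edge elements): an alternative
-- decomposition, same exact result.


-- ===== PORT A =====
def sum_outer_border (matrix : List (List Int)) : Int :=
  if matrix = [] ∨ matrix.headD [] = [] then 0
  else
    let rows : Int := matrix.length
    let cols : Int := (matrix.headD []).length
    let total : Int := 0 + (matrix.headD []).sum
    let total : Int :=
      if rows > 1 then total + (PySem.List.pyGetD matrix (rows - 1) []).sum else total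
    (PySem.List.pyRange 1 (rows - 1) 1).foldl
      (fun t i =>
        let t := t + PySem.List.pyGetD (PySem.List.pyGetD matrix i []) 0 0
        if cols > 1 then t + PySem.List.pyGetD (PySem.List.pyGetD matrix i []) (cols - 1) 0 else t)
      total

-- ===== PORT B =====
-- edge contribution of a non-last tail row: row[0] + (row[cols-1] if cols > 1 else 0)
def pvEdge (cols : Int) (row : List Int) : Int :=
  PySem.List.pyGetD row 0 0 + (if cols > 1 then PySem.List.pyGetD row (cols - 1) 0 else 0)

-- Source B's rest_sum: last row contributes its full sum, earlier rows their edges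
def pvRestSum (cols : Int) : List (List Int) → Int
  | [] => 0
  | [r] => r.sum
  | r :: rs => pvEdge cols r + pvRestSum cols rs

def sum_outer_border_alt (matrix : List (List Int)) : Int :=
  if matrix = [] ∨ matrix.headD [] = [] then 0
  else (matrix.headD []).sum + pvRestSum ((matrix.headD []).length : Int) matrix.tail

-- ===== PRECONDITION & SPEC =====
-- Pre_ excludes exactly the ragged matrices on which the Python A raises IndexError (a middle
-- row shorter than len(matrix[0])); the Python B raises IndexError at the same rows there.
def Pre_sum_outer_border (matrix : List (List Int)) : Prop :=
  ∀ row ∈ matrix.tail.dropLast, (matrix.headD []).length ≤ row.length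
instance (matrix : List (List Int)) : Decidable (Pre_sum_outer_border matrix) := by
  unfold Pre_sum_outer_border; infer_instance
def pvWitness_sum_outer_border : List (List Int) := [[1, 2], [3, 4], [5, 6]]

def Spec_sum_outer_border (matrix : List (List Int)) (out : Int) : Prop := out = sum_outer_border_alt matrix
instance (matrix : List (List Int)) (out : Int) : Decidable (Spec_sum_outer_border matrix out) := by unfold Spec_sum_outer_border; infer_instance

-- ===== CLAIM (what is proved, stated in full; the proofs are below) =====
def Claim_equal_sum_outer_border : Prop := ∀ (matrix : List (List Int)), Dom_sum_outer_border matrix → Pre_sum_outer_border matrix → Spec_sum_outer_border matrix (sum_outer_border matrix)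

-- ===== LEMMAS AND PROOFS =====

-- B's recursion on mid ++ [lastr]: edges of mid plus full sum of the last row
lemma pvRestSum_append_singleton (cols : Int) (mid : List (List Int)) (lastr : List Int) :
    pvRestSum cols (mid ++ [lastr]) = ((mid.map (pvEdge cols)).sum) + lastr.sum := by
  induction mid with
  | nil => simp [pvRestSum]
  | cons r rs ih =>
    cases rs with
    | nil => simp [pvRestSum]
    | cons r' rs' =>
      have h : pvRestSum cols ((r :: r' :: rs') ++ [lastr])
          = pvEdge cols r + pvRestSum cols ((r' :: rs') ++ [lastr]) := rfl
      rw [h, ih]; simp only [List.map_cons, List.sum_cons]; ring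

-- A's loop over range(1, rows-1) collects exactly the edges of the middle rows
lemma pvALoop (r0 : List Int) (mid : List (List Int)) (lastr : List Int) (cols total : Int) :
    (PySem.List.pyRange 1 (((r0 :: (mid ++ [lastr])).length : Int) - 1) 1).foldl
      (fun t i =>
        if cols > 1 then
          t + PySem.List.pyGetD (PySem.List.pyGetD (r0 :: (mid ++ [lastr])) i []) 0 0
            + PySem.List.pyGetD (PySem.List.pyGetD (r0 :: (mid ++ [lastr])) i []) (cols - 1) 0
        else t + PySem.List.pyGetD (PySem.List.pyGetD (r0 :: (mid ++ [lastr])) i []) 0 0)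
      total = total + (mid.map (pvEdge cols)).sum := by
  have hlen : ((r0 :: (mid ++ [lastr])).length : Int) - 1 = ((r0 :: mid).length : Int) := by
    simp only [List.length_cons, List.length_append, List.length_nil]
    push_cast; ring
  rw [hlen]
  have hcongr :
      (PySem.List.pyRange 1 ((r0 :: mid).length : Int) 1).foldl
        (fun t i =>
          if cols > 1 then
            t + PySem.List.pyGetD (PySem.List.pyGetD (r0 :: (mid ++ [lastr])) i []) 0 0
              + PySem.List.pyGetD (PySem.List.pyGetD (r0 :: (mid ++ [lastr])) i []) (cols - 1) 0
          else t + PySem.List.pyGetD (PySem.List.pyGetD (r0 :: (mid ++ [lastr])) i []) 0 0)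
        total
      = (PySem.List.pyRange 1 ((r0 :: mid).length : Int) 1).foldl
        (fun t i => t + pvEdge cols (PySem.List.pyGetD (r0 :: mid) i [])) total := by
    apply PySem.List.foldl_congr_mem
    intro acc i hi
    have hmem := (PySem.List.mem_pyRange_one).mp hi
    have hget : PySem.List.pyGetD (r0 :: (mid ++ [lastr])) i []
        = PySem.List.pyGetD (r0 :: mid) i [] := by
      have hi' : i = ((i.toNat : Nat) : Int) := by omega
      have hlt : i.toNat < (r0 :: mid).length := by
        have := hmem.2; simp only [List.length_cons] at this ⊢; omega
      rw [hi', PySem.List.pyGetD_natCast, PySem.List.pyGetD_natCast]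
      have hsplit : r0 :: (mid ++ [lastr]) = (r0 :: mid) ++ [lastr] := rfl
      rw [hsplit, List.getD_eq_getElem?_getD, List.getD_eq_getElem?_getD,
          List.getElem?_append_left hlt]
    rw [hget]
    unfold pvEdge
    split_ifs <;> ring
  rw [hcongr]
  have hfold := PySem.List.foldl_pyRange_pyGetD (xs := r0 :: mid) (a := 1) (d := ([] : List Int))
      (f := fun t row => t + pvEdge cols row) (init := total) (by norm_num)
  simp only [PySem.List.len] at hfold
  rw [hfold]
  simpa using PySem.List.foldl_add (g := pvEdge cols) (l := mid) (a := total)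

lemma pvLast_get (r0 : List Int) (mid : List (List Int)) (lastr : List Int) :
    PySem.List.pyGetD (r0 :: (mid ++ [lastr])) (((r0 :: (mid ++ [lastr])).length : Int) - 1) []
      = lastr := by
  have h : ((r0 :: (mid ++ [lastr])).length : Int) - 1 = ((mid.length + 1 : Nat) : Int) := by
    simp only [List.length_cons, List.length_append, List.length_nil]
    push_cast; ring
  rw [h, PySem.List.pyGetD_natCast]
  have hsplit : r0 :: (mid ++ [lastr]) = (r0 :: mid) ++ [lastr] := rfl
  rw [hsplit, List.getD_eq_getElem?_getD]
  simp

-- ===== VERDICT (by name: the statement is the Claim_ definition above) =====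
theorem sum_outer_border_spec : Claim_equal_sum_outer_border := by
  intro matrix _dom _pre
  unfold Spec_sum_outer_border sum_outer_border sum_outer_border_alt
  cases matrix with
  | nil => simp
  | cons r0 rest =>
    by_cases h0 : r0 = []
    · simp [h0]
    · have hc : ¬(r0 :: rest = [] ∨ (r0 :: rest).headD [] = []) := by simp [h0]
      simp only [if_neg hc]
      simp only [List.headD_cons, List.tail_cons]
      rcases List.eq_nil_or_concat rest with hrest | ⟨mid, lastr, hrest⟩

      · subst hrest
        have hn : ¬(((([r0] : List (List Int)).length : Int)) > 1) := by simp
        rw [if_neg hn]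
        simp [pvRestSum, PySem.List.pyRange_one_eq_nil]
      · rw [List.concat_eq_append] at hrest
        subst hrest
        have hrows : ((r0 :: (mid ++ [lastr])).length : Int) > 1 := by
          simp only [List.length_cons, List.length_append, List.length_nil]
          push_cast; omega
        rw [if_pos hrows]
        rw [pvALoop r0 mid lastr, pvLast_get r0 mid lastr, pvRestSum_append_singleton]
        ring
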